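-- pv_equiv track=rewrite | github.com/vs-uulm/nemesys | src/inference/segments.py | plateouStart
-- ===== SOURCE A (Python) =====
-- from typing import Dict, List, Union, Type, Any, Tuple, Iterable
--
-- def plateouStart(sequence) -> Tuple[List, List]:
--     """
--     Determine begins of sequences of plateaus in value.
--
--     :param sequence: A sequence of subscriptable values.
--     :return: a list of two lists:
--         (1) the sequence indices of the plateau begins,
--         and (2) the corresponding values.
--     """
--     plateau = ([], [])
--     for index, center in enumerate(sequence[1:-1], 1):
--         before = sequence[index - 1]
--         after = sequence[index + 1]
--         if before != center == after:
--             plateau[0].append(index)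
--             plateau[1].append(center)
--     return plateau
-- ===== SOURCE B (Python) =====
-- from itertools import groupby
--
-- def plateouStart(sequence):
--     """Group into maximal runs of equal values; a plateau begin is a run of
--     length >= 2 that does not start at index 0."""
--     indices, values = [], []
--     for value, group in groupby(enumerate(sequence), key=lambda iv: iv[1]):
--         run = list(group)
--         start = run[0][0]
--         if start != 0 and len(run) >= 2:
--             indices.append(start)
--             values.append(value)
--     return (indices, values)
-- ===== Notes on version B (the rewrite author's own statement) =====
-- stated objective: idiomatic
-- what changed: Replaces the index-arithmetic neighbour test (sequence[i-1] != sequence[i] == sequence[i+1] over a slice) by grouping the sequence into maximal runs with itertools.groupby and emitting every run of length >= 2 that does not start at index 0.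
import Mathlib
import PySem

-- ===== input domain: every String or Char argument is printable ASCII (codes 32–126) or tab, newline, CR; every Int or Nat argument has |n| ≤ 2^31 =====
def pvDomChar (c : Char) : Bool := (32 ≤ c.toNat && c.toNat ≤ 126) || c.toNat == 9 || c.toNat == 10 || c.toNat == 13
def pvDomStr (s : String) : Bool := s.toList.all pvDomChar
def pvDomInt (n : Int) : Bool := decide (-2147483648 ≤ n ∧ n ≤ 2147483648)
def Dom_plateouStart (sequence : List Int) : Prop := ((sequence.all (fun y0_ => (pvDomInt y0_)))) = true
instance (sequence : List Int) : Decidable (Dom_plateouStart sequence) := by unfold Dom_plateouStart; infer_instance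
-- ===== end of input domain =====

-- B replaces A's neighbour-index test by maximal-run grouping (idiomatic groupby); equal results proved.

-- ===== PORT A =====
-- indices are always in range in A's loop, so pyGetD (default 0) is exact here
def plateouStart (sequence : List Int) : List Int × List Int :=
  (PySem.List.enumerate (PySem.List.slice sequence (some 1) (some (-1))) 1).foldl
    (fun plateau ic =>
      let index := ic.1
      let center := ic.2
      let before := PySem.List.pyGetD sequence (index - 1) 0
      let after := PySem.List.pyGetD sequence (index + 1) 0
      if before ≠ center ∧ center = after then (plateau.1 ++ [index], plateau.2 ++ [center])
      else plateau)
    ([], [])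

-- ===== PORT B =====
-- takeRun v xs = (length of the prefix of xs equal to v, the rest)
def takeRun (v : Int) : List Int → Nat × List Int
  | [] => (0, [])
  | x :: xs =>
    if x = v then
      let p := takeRun v xs
      (p.1 + 1, p.2)
    else (0, x :: xs)

theorem takeRun_snd_length_le (v : Int) : ∀ xs : List Int, (takeRun v xs).2.length ≤ xs.length := by
  intro xs
  induction xs with
  | nil => simp [takeRun]
  | cons x xs ih =>
    simp only [takeRun]
    split
    · exact Nat.le_succ_of_le ih
    · simp

-- runsFrom i xs = the maximal runs of xs as (start index, value, length), starts counted from i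
def runsFrom (i : Int) : List Int → List (Int × Int × Nat)
  | [] => []
  | x :: xs =>
    let p := takeRun x xs
    (i, x, p.1 + 1) :: runsFrom (i + (↑(p.1 + 1) : Int)) p.2
termination_by xs => xs.length
decreasing_by
  exact Nat.lt_succ_of_le (takeRun_snd_length_le x xs)

def plateouStart_alt (sequence : List Int) : List Int × List Int :=
  let rs := (runsFrom 0 sequence).filter (fun r => decide (r.1 ≠ 0 ∧ 2 ≤ r.2.2))
  (rs.map (·.1), rs.map (·.2.1))

-- ===== PRECONDITION & SPEC =====
def Spec_plateouStart (sequence : List Int) (out : List Int × List Int) : Prop := out = plateouStart_alt sequence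
instance (sequence : List Int) (out : List Int × List Int) : Decidable (Spec_plateouStart sequence out) := by unfold Spec_plateouStart; infer_instance

-- ===== CLAIM (what is proved, stated in full; the proofs are below) =====
def Claim_equal_plateouStart : Prop := ∀ (sequence : List Int), Dom_plateouStart sequence → Spec_plateouStart sequence (plateouStart sequence)

-- ===== LEMMAS AND PROOFS =====

-- A's neighbour condition as a predicate on (index, center)
def condA (seq : List Int) (p : Int × Int) : Bool :=
  decide (PySem.List.pyGetD seq (p.1 - 1) 0 ≠ p.2 ∧ p.2 = PySem.List.pyGetD seq (p.1 + 1) 0)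

-- triple-scan reformulation of A's loop: triA i before rest
def triA : Int → Int → List Int → List (Int × Int)
  | i, before, b :: c :: rest =>
    (if before ≠ b ∧ b = c then [(i, b)] else []) ++ triA (i + 1) b (c :: rest)
  | _, _, _ => []

theorem foldA (seq : List Int) :
    ∀ (l : List (Int × Int)) (a b : List Int),
    l.foldl
      (fun plateau ic =>
        let index := ic.1
        let center := ic.2
        let before := PySem.List.pyGetD seq (index - 1) 0
        let after := PySem.List.pyGetD seq (index + 1) 0
        if before ≠ center ∧ center = after then (plateau.1 ++ [index], plateau.2 ++ [center])
        else plateau)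
      (a, b)
    = (a ++ (l.filter (condA seq)).map (·.1), b ++ (l.filter (condA seq)).map (·.2)) := by
  intro l
  induction l with
  | nil => intro a b; simp
  | cons e l ih =>
    intro a b
    by_cases h : PySem.List.pyGetD seq (e.1 - 1) 0 ≠ e.2 ∧ e.2 = PySem.List.pyGetD seq (e.1 + 1) 0
    · simp only [List.foldl_cons, List.filter_cons, condA, decide_eq_true_eq]
      rw [if_pos h, if_pos h, ih]
      simp
    · simp only [List.foldl_cons, List.filter_cons, condA, decide_eq_true_eq]
      rw [if_neg h, if_neg h, ih]

theorem enumTri :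
    ∀ (tl pre : List Int) (before : Int),
    (PySem.List.enumerate tl.dropLast ((pre.length : Int) + 1)).filter
        (condA (pre ++ before :: tl))
    = triA ((pre.length : Int) + 1) before tl := by
  intro tl
  induction tl with
  | nil => intro pre before; simp [triA]
  | cons b tl ih =>
    intro pre before
    cases tl with
    | nil => simp [triA]
    | cons c rest =>
      have hdl : (b :: c :: rest).dropLast = b :: (c :: rest).dropLast := by simp
      rw [hdl, PySem.List.enumerate_cons, List.filter_cons]
      have hbefore : PySem.List.pyGetD (pre ++ before :: b :: c :: rest) ((pre.length : Int) + 1 - 1) 0 = before := by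
        have : ((pre.length : Int) + 1 - 1) = ((pre.length : Nat) : Int) := by omega
        rw [this, PySem.List.pyGetD_natCast]
        simp [List.getD_eq_getElem?_getD]
      have hafter : PySem.List.pyGetD (pre ++ before :: b :: c :: rest) ((pre.length : Int) + 1 + 1) 0 = c := by
        have : ((pre.length : Int) + 1 + 1) = (((pre.length + 2 : Nat)) : Int) := by omega
        rw [this, PySem.List.pyGetD_natCast]
        simp [List.getD_eq_getElem?_getD]
      have hc : condA (pre ++ before :: b :: c :: rest) ((pre.length : Int) + 1, b)
          = decide (before ≠ b ∧ b = c) := by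
        simp only [condA, hbefore, hafter]
      have ihx := ih (pre ++ [before]) b
      have harr : pre ++ [before] ++ b :: c :: rest = pre ++ before :: b :: c :: rest := by simp
      have hlen : (((pre ++ [before]).length : Nat) : Int) + 1 = (pre.length : Int) + 1 + 1 := by
        push_cast [List.length_append, List.length_cons, List.length_nil]; ring
      rw [harr, hlen] at ihx
      show _ = triA ((pre.length : Int) + 1) before (b :: c :: rest)
      rw [triA]
      rw [hc, ihx]
      by_cases hb : before = b
      · simp [hb]
      · by_cases hcc : b = c
        · have hbc : ¬ before = c := hcc ▸ hb
          simp [hcc, hbc]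
        · simp [hb, hcc]

-- skipping through a run of the previous value changes nothing
theorem triA_absorb (a : Int) :
    ∀ (xs : List Int) (i : Int),
    triA i a xs = triA (i + ((takeRun a xs).1 : Int)) a (takeRun a xs).2 := by
  intro xs
  induction xs with
  | nil => intro i; simp [takeRun]
  | cons x xs ih =>
    intro i
    by_cases hx : x = a
    · subst hx
      cases xs with
      | nil => simp [takeRun, triA]
      | cons c rest =>
        have h1 : triA i x (x :: c :: rest) = triA (i + 1) x (c :: rest) := by
          rw [triA]; simp
        rw [h1, ih (i + 1)]
        simp only [takeRun]
        congr 1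
        push_cast
        ring
    · simp [takeRun, hx]

theorem takeRun_snd_head (v : Int) :
    ∀ (xs : List Int) (y : Int) (ys : List Int), (takeRun v xs).2 = y :: ys → y ≠ v := by
  intro xs
  induction xs with
  | nil => intro y ys h; simp [takeRun] at h
  | cons x xs ih =>
    intro y ys h
    by_cases hx : x = v
    · simp only [takeRun, if_pos hx] at h
      exact ih y ys h
    · simp only [takeRun, if_neg hx] at h
      injection h with h1 _
      exact h1 ▸ hx

theorem triA_runs :
    ∀ (N : Nat) (r : List Int) (a i : Int), r.length ≤ N → 1 ≤ i →
    (∀ y ys, r = y :: ys → y ≠ a) →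
    triA i a r
      = ((runsFrom i r).filter (fun p => decide (p.1 ≠ 0 ∧ 2 ≤ p.2.2))).map
          (fun p => (p.1, p.2.1)) := by
  intro N
  induction N with
  | zero =>
    intro r a i hN hi _
    have : r = [] := List.length_eq_zero_iff.mp (Nat.le_zero.mp hN)
    subst this
    simp [triA, runsFrom]
  | succ N ih =>
    intro r a i hN hi hhead
    cases r with
    | nil => simp [triA, runsFrom]
    | cons b tail =>
      have hba : b ≠ a := hhead b tail rfl
      cases tail with
      | nil =>
        simp [runsFrom, triA, takeRun]
      | cons c rest2 =>
        have hTR := takeRun_snd_length_le b (c :: rest2)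
        have hlen2 : (takeRun b (c :: rest2)).2.length ≤ N := by
          simp only [List.length_cons] at hN hTR
          omega
        rw [triA, runsFrom]
        rw [triA_absorb b (c :: rest2) (i + 1)]
        rw [ih _ b _ hlen2 (by omega) (fun y ys hy => takeRun_snd_head b (c :: rest2) y ys hy)]
        rw [show i + 1 + ((takeRun b (c :: rest2)).1 : Int)
              = i + (((takeRun b (c :: rest2)).1 + 1 : Nat) : Int) by push_cast; ring]
        simp only [List.filter_cons]
        by_cases hbc : b = c
        · have hm : 1 ≤ (takeRun b (c :: rest2)).1 := by subst hbc; simp [takeRun]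
          rw [if_pos (show a ≠ b ∧ b = c from ⟨fun h => hba h.symm, hbc⟩)]
          rw [show (decide ((i : Int) ≠ 0 ∧ 2 ≤ (takeRun b (c :: rest2)).1 + 1)) = true by
                simp; exact ⟨by omega, by omega⟩]
          simp
        · have hm : (takeRun b (c :: rest2)).1 = 0 := by
            have hcb : ¬ c = b := fun h => hbc h.symm
            simp [takeRun, hcb]
          rw [if_neg (show ¬ (a ≠ b ∧ b = c) from fun h => hbc h.2)]
          rw [show (decide ((i : Int) ≠ 0 ∧ 2 ≤ (takeRun b (c :: rest2)).1 + 1)) = false by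
                simp [hm]]
          simp

theorem slice_one_negone (a : Int) (rest : List Int) :
    PySem.List.slice (a :: rest) (some 1) (some (-1)) = rest.dropLast := by
  simp [PySem.List.slice, PySem.List.clampIdx, List.dropLast_eq_take]
  rw [if_neg (by omega : ¬ ((rest.length : Int) < 0))]
  omega

-- ===== VERDICT (by name: the statement is the Claim_ definition above) =====
theorem plateouStart_spec : Claim_equal_plateouStart := by
  intro sequence _
  unfold Spec_plateouStart plateouStart plateouStart_alt
  cases sequence with
  | nil => simp [PySem.List.slice, runsFrom]
  | cons a rest =>
    rw [slice_one_negone, foldA]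
    have he := enumTri rest [] a
    simp only [List.length_nil, Nat.cast_zero, zero_add, List.nil_append] at he
    rw [he]
    rw [triA_absorb a rest 1]
    rw [runsFrom]
    rw [triA_runs (takeRun a rest).2.length (takeRun a rest).2 a (1 + ((takeRun a rest).1 : Int))
        le_rfl (by omega) (fun y ys hy => takeRun_snd_head a rest y ys hy)]
    simp only [List.filter_cons]
    rw [show (decide ((0 : Int) ≠ 0 ∧ 2 ≤ (takeRun a rest).1 + 1)) = false by simp]
    rw [show (1 : Int) + ((takeRun a rest).1 : Int)
          = 0 + (((takeRun a rest).1 + 1 : Nat) : Int) by push_cast; ring]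
    simp [List.map_map, Function.comp_def]
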